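-- pv_equiv track=rewrite | github.com/leomv09/BabylonTowerSolver | core/util.py | _find
-- ===== SOURCE A (Python) =====
-- def _find(list, element, index):
--     """Find an element in a list.
--     The search is started at a specific index and then is expanded in both directions.
--
--     parameters:
--         [list] list -- The list.
--         [object] element -- The element to search.
--         [int] index -- The start index.
--     """
--     if (index < 0 or index >= len(list)):
--         raise IndexError("list index out of range")
--
--     max_delta = max(index + 1, len(list) - index)
--     delta = 0
--
--     while delta < max_delta:
--         lower_index = index - delta
--         if lower_index >= 0 and list[lower_index] == element:
--             return lower_index
--
--         upper_index = index + delta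
--         if upper_index <= len(list) - 1 and list[upper_index] == element:
--             return upper_index
--
--         delta += 1
--
--     raise ValueError(element + " is not in list")
-- ===== SOURCE B (Python) =====
-- def _find(list, element, index):
--     if index < 0 or index >= len(list):
--         raise IndexError("list index out of range")
--     best = None
--     for i, x in enumerate(list):
--         if x == element and (best is None or abs(i - index) < abs(best - index)):
--             best = i
--     if best is None:
--         raise ValueError(element + " is not in list")
--     return best
-- ===== Notes on version B (the rewrite author's own statement) =====
-- stated objective: simpler
-- what changed: Replaces the outward-expanding while loop with its two per-step bounds checks by a single left-to-right pass over enumerate(list) keeping the index with strictly smallest distance to the start index (strict < preserves A's lowest-index tie-break).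
import Mathlib
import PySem

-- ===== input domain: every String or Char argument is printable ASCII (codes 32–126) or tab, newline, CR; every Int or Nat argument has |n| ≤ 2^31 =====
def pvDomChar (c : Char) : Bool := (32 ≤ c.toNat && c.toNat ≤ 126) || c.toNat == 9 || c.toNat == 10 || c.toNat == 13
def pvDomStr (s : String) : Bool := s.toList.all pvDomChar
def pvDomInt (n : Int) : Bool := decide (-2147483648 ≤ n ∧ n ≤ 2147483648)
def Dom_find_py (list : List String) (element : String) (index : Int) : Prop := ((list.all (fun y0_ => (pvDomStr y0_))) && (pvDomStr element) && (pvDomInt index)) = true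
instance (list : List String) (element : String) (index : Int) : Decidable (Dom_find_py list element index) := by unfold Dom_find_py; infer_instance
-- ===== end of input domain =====

-- B replaces A's outward-expanding while loop by a single left-to-right pass keeping the index with
-- strictly smallest distance to the start index (strict update preserves A's lowest-index tie-break).

-- ===== PORT A =====
-- the while loop: fuel = remaining iterations (max_delta - delta); -1 stands for the ValueError exit, outside Pre_
def findA_loop (l : List String) (e : String) (index : Int) : Int → Nat → Int
  | _, 0 => -1
  | delta, fuel+1 =>
    let lower := index - delta
    if 0 ≤ lower ∧ PySem.List.pyGet? l lower = some e then lower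
    else
      let upper := index + delta
      if upper ≤ (l.length : Int) - 1 ∧ PySem.List.pyGet? l upper = some e then upper
      else findA_loop l e index (delta + 1) fuel

def find_py (list : List String) (element : String) (index : Int) : Int :=
  if index < 0 ∨ (list.length : Int) ≤ index then -1   -- IndexError, outside Pre_
  else findA_loop list element index 0 (max (index + 1) ((list.length : Int) - index)).toNat

-- ===== PORT B =====
-- 'if x == element and (best is None or abs(i - index) < abs(best - index)): best = i'
def findB_step (e : String) (index : Int) (best : Option Int) (p : Int × String) : Option Int :=
  match best with
  | none => if p.2 = e then some p.1 else none
  | some b => if p.2 = e ∧ |p.1 - index| < |b - index| then some p.1 else some b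

def find_py_alt (list : List String) (element : String) (index : Int) : Int :=
  if index < 0 ∨ (list.length : Int) ≤ index then -1   -- IndexError, outside Pre_
  else
    match (PySem.List.enumerate list 0).foldl (findB_step element index) none with
    | none => -1   -- ValueError, outside Pre_
    | some b => b

-- ===== PRECONDITION & SPEC =====
-- Pre_ excludes exactly the inputs where A raises: index out of range (IndexError) and element absent (ValueError).
def Pre_find_py (list : List String) (element : String) (index : Int) : Prop :=
  0 ≤ index ∧ index < (list.length : Int) ∧ element ∈ list
instance (list : List String) (element : String) (index : Int) : Decidable (Pre_find_py list element index) := by unfold Pre_find_py; infer_instance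

def pvWitness_find_py : List String × String × Int := (["a", "b"], "b", 0)

def Spec_find_py (list : List String) (element : String) (index : Int) (out : Int) : Prop := out = find_py_alt list element index
instance (list : List String) (element : String) (index : Int) (out : Int) : Decidable (Spec_find_py list element index out) := by unfold Spec_find_py; infer_instance

-- ===== CLAIM (what is proved, stated in full; the proofs are below) =====
def Claim_equal_find_py : Prop := ∀ (list : List String) (element : String) (index : Int), Dom_find_py list element index → Pre_find_py list element index → Spec_find_py list element index (find_py list element index)

-- ===== LEMMAS AND PROOFS =====

-- invariant of B's fold over enumerate: the accumulator is the earliest distance-minimising match seen so far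
theorem foldB_spec (e : String) (index : Int) :
    ∀ (xs : List String) (s : Int) (acc : Option Int),
    (∀ b, acc = some b → b < s) →
    (((PySem.List.enumerate xs s).foldl (findB_step e index) acc = none) ↔
       (acc = none ∧ ∀ k (hk : k < xs.length), xs[k] ≠ e))
    ∧ (∀ b, (PySem.List.enumerate xs s).foldl (findB_step e index) acc = some b →
        ((acc = some b ∨ ∃ k, ∃ hk : k < xs.length, b = s + k ∧ xs[k] = e)
         ∧ (∀ b0, acc = some b0 → b = b0 ∨ |b - index| < |b0 - index|)
         ∧ (∀ k (hk : k < xs.length), xs[k] = e →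
              |b - index| < |s + k - index| ∨ (|b - index| = |s + k - index| ∧ b ≤ s + k)))) := by
  intro xs
  induction xs with
  | nil =>
    intro s acc hacc
    refine ⟨by simp [PySem.List.enumerate_nil], ?_⟩
    intro b hb
    simp [PySem.List.enumerate_nil] at hb
    refine ⟨Or.inl (by rw [hb]), ?_, ?_⟩
    · intro b0 h0; rw [hb] at h0; exact Or.inl (Option.some.inj h0)
    · intro k hk; simp at hk
  | cons x rest ih =>
    intro s acc hacc
    rw [PySem.List.enumerate_cons]
    simp only [List.foldl_cons]
    set acc' := findB_step e index acc (s, x) with hacc'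
    have hacc'lt : ∀ b, acc' = some b → b < s + 1 := by
      intro b h
      rcases acc with _ | b0
      · simp only [findB_step, hacc'] at h
        split_ifs at h
        cases h; omega
      · simp only [findB_step, hacc'] at h
        split_ifs at h <;> injection h with h
        all_goals first | omega | (have := hacc b0 rfl; omega)
    obtain ⟨ih1, ih2⟩ := ih (s + 1) acc' hacc'lt
    constructor
    · rw [ih1]
      constructor
      · rintro ⟨h1, h2⟩
        rcases acc with _ | b0
        · by_cases hx : x = e
          · exfalso; simp [findB_step, hx, hacc'] at h1
          · refine ⟨rfl, ?_⟩
            intro k hk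
            cases k with
            | zero => simpa using hx
            | succ k => simpa using h2 k (by simpa using hk)
        · exfalso; simp only [findB_step, hacc'] at h1; split_ifs at h1
      · rintro ⟨h1, h2⟩
        subst h1
        have hx : x ≠ e := by simpa using h2 0 (by simp)
        refine ⟨by simp [findB_step, hacc', hx], ?_⟩
        intro k hk
        simpa using h2 (k + 1) (by simpa using hk)
    · intro b hb
      obtain ⟨m1, m2, m3⟩ := ih2 b hb
      have memb : acc = some b ∨ ∃ k, ∃ hk : k < (x :: rest).length, b = s + k ∧ (x :: rest)[k] = e := by
        rcases m1 with h | ⟨k, hk, hbk, hke⟩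
        · rcases acc with _ | b0
          · by_cases hx : x = e
            · simp only [findB_step, hacc', hx, if_pos] at h
              injection h with h
              exact Or.inr ⟨0, by simp, by omega, by simpa using hx⟩
            · simp [findB_step, hacc', hx] at h
          · simp only [findB_step, hacc'] at h
            split_ifs at h with hc
            · injection h with h
              exact Or.inr ⟨0, by simp, by omega, by simpa using hc.1⟩
            · injection h with h; exact Or.inl (by rw [h])
        · exact Or.inr ⟨k + 1, by simpa using hk, by push_cast; omega, by simpa using hke⟩
      have hb0cl : ∀ b0, acc = some b0 → b = b0 ∨ |b - index| < |b0 - index| := by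
        intro b0 h0
        subst h0
        simp only [findB_step, hacc'] at m2
        split_ifs at m2 with hc
        · rcases m2 s rfl with h | h
          · exact Or.inr (by rw [h]; exact hc.2)
          · exact Or.inr (lt_trans h hc.2)
        · exact m2 b0 rfl
      refine ⟨memb, hb0cl, ?_⟩
      intro k hk hke
      cases k with
      | zero =>
        simp only [List.getElem_cons_zero] at hke
        have goal0 : |b - index| < |s - index| ∨ (|b - index| = |s - index| ∧ b ≤ s) := by
          rcases acc with _ | b0
          · have : acc' = some s := by simp [findB_step, hacc', hke]
            rw [this] at m2
            rcases m2 s rfl with h | h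
            · exact Or.inr ⟨by rw [h], by omega⟩
            · exact Or.inl h
          · simp only [findB_step, hacc'] at m2
            split_ifs at m2 with hc
            · rcases m2 s rfl with h | h
              · exact Or.inr ⟨by rw [h], by omega⟩
              · exact Or.inl h
            · have hle : |s - index| ≥ |b0 - index| := by
                by_contra hlt; exact hc ⟨hke, by omega⟩
              rcases m2 b0 rfl with h | h
              · subst h
                rcases lt_or_eq_of_le hle with h2 | h2
                · exact Or.inl h2
                · exact Or.inr ⟨h2, le_of_lt (hacc b rfl)⟩
              · exact Or.inl (lt_of_lt_of_le h hle)
        simpa using goal0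
      | succ k =>
        have := m3 k (by simpa using hk) (by simpa using hke)
        have harith : s + 1 + (k : Int) = s + ((k + 1 : Nat) : Int) := by push_cast; ring
        rw [harith] at this
        exact this

-- A's expanding loop returns b once b is characterised as the distance-then-index argmin among matches
theorem loopA_eq (l : List String) (e : String) (index b : Int) (hind : 0 ≤ index)
    (hb0 : 0 ≤ b) (hbl : b < (l.length : Int)) (hget : PySem.List.pyGet? l b = some e)
    (hmin : ∀ k (hk : k < l.length), l[k] = e →
       |b - index| < |(k : Int) - index| ∨ (|b - index| = |(k : Int) - index| ∧ b ≤ (k : Int))) :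
    ∀ (fuel : Nat) (delta : Int), 0 ≤ delta → delta ≤ |b - index| → |b - index| < delta + fuel →
      findA_loop l e index delta fuel = b := by
  intro fuel
  induction fuel with
  | zero =>
    intro delta h0 h1 h2
    exfalso
    simp only [Int.abs_eq_natAbs] at h1 h2
    omega
  | succ fuel ihf =>
    intro delta h0 h1 h2
    simp only [findA_loop]
    split_ifs with hg1 hg2
    · obtain ⟨hl0, hlg⟩ := hg1
      rw [PySem.List.pyGet?_of_nonneg _ hl0, List.getElem?_eq_some_iff] at hlg
      obtain ⟨hlt, hle⟩ := hlg
      have hm := hmin _ hlt hle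
      rw [Int.toNat_of_nonneg hl0] at hm
      rcases hm with hm | ⟨hm, hm2⟩ <;> simp only [Int.abs_eq_natAbs] at hm h1 <;> omega
    · obtain ⟨hu1, hug⟩ := hg2
      have hu0 : (0 : Int) ≤ index + delta := by omega
      rw [PySem.List.pyGet?_of_nonneg _ hu0, List.getElem?_eq_some_iff] at hug
      obtain ⟨hlt, hle⟩ := hug
      have hm := hmin _ hlt hle
      rw [Int.toNat_of_nonneg hu0] at hm
      have hA : ¬ (b = index - delta) := fun hbe => hg1 ⟨by omega, hbe ▸ hget⟩
      rcases hm with hm | ⟨hm, hm2⟩ <;> simp only [Int.abs_eq_natAbs] at hm h1 <;> omega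
    · have hA : ¬ (b = index - delta) := fun hbe => hg1 ⟨by omega, hbe ▸ hget⟩
      have hB : ¬ (b = index + delta) := fun hbe => hg2 ⟨by omega, hbe ▸ hget⟩
      apply ihf (delta + 1) (by omega) ?_ ?_ <;>
        simp only [Int.abs_eq_natAbs] at h1 h2 ⊢ <;> omega

-- ===== VERDICT (by name: the statement is the Claim_ definition above) =====
theorem find_py_spec : Claim_equal_find_py := by
  intro list element index _dom hpre
  obtain ⟨hi0, hil, hmem⟩ := hpre
  show find_py list element index = find_py_alt list element index
  have hcond : ¬ (index < 0 ∨ (list.length : Int) ≤ index) := by omega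
  rw [find_py, find_py_alt, if_neg hcond, if_neg hcond]
  obtain ⟨ih1, ih2⟩ := foldB_spec element index list 0 none (by simp)
  rcases hrr : (PySem.List.enumerate list 0).foldl (findB_step element index) none with _ | bb
  · exfalso
    obtain ⟨_, hno⟩ := ih1.mp hrr
    obtain ⟨k, hk, hke⟩ := List.mem_iff_getElem.mp hmem
    exact hno k hk hke
  · obtain ⟨m1, m2, m3⟩ := ih2 bb hrr
    rcases m1 with h | ⟨k, hk, hbk, hke⟩
    · exact absurd h (by simp)
    · rw [zero_add] at hbk
      subst hbk
      have hget : PySem.List.pyGet? list (k : Int) = some element := by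
        rw [PySem.List.pyGet?_natCast]
        exact List.getElem?_eq_some_iff.mpr ⟨hk, hke⟩
      have hmin : ∀ j (hj : j < list.length), list[j] = element →
          |(k : Int) - index| < |(j : Int) - index| ∨
            (|(k : Int) - index| = |(j : Int) - index| ∧ (k : Int) ≤ (j : Int)) := by
        intro j hj hje
        have := m3 j hj hje
        rwa [zero_add] at this
      have htn : (((max (index + 1) ((list.length : Int) - index)).toNat : Int))
          = max (index + 1) ((list.length : Int) - index) := Int.toNat_of_nonneg (by omega)
      exact loopA_eq list element index (k : Int) hi0 (by omega) (by omega) hget hmin _ 0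
        le_rfl (abs_nonneg _)
        (by rw [zero_add, htn]; simp only [Int.abs_eq_natAbs]; omega)
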